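-- pv_equiv track=rewrite | github.com/Dat19022001/baipy | bobanguyento.py | ucln
-- ===== SOURCE A (Python) =====
-- def ucln(a,b):
--     if b == 0:
--         if a == 1:
--             return True;
--         else:
--             return False;
--     else:
--         return ucln(b,a%b);
-- ===== SOURCE B (Python) =====
-- def ucln(a, b):
--     while b != 0:
--         a, b = b, a % b
--     return a == 1
-- ===== Notes on version B (the rewrite author's own statement) =====
-- stated objective: idiomatic
-- what changed: Replaced the recursive Euclidean coprimality test by an iterative while-loop maintaining the pair (a,b) with the same modular update, returning a == 1.
import Mathlib
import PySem

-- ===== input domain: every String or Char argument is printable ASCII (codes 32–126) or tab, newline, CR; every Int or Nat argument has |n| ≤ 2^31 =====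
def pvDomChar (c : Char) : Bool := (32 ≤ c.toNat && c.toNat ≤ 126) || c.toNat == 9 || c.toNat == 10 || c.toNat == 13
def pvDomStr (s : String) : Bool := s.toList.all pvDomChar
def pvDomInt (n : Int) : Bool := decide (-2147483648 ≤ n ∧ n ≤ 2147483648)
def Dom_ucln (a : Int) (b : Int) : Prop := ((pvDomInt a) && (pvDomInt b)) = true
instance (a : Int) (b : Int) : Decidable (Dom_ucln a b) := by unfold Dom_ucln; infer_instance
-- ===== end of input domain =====

-- B replaces A's recursion by an iterative Euclidean loop ending with `a == 1` (idiomatic, same cost).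

-- termination measure: Python's `%` takes the divisor's sign, so |a % b| < |b| for b ≠ 0
theorem pyMod_natAbs_lt (a b : Int) (hb : b ≠ 0) :
    (PySem.Int.mod a b).natAbs < b.natAbs := by
  rcases lt_or_gt_of_ne hb with h | h
  · have := PySem.Int.mod_neg_bounds a h
    omega
  · have h1 := PySem.Int.mod_nonneg a h
    have h2 := PySem.Int.mod_lt a h
    omega

-- ===== PORT A =====
def ucln (a : Int) (b : Int) : Bool :=
  if _hb : b = 0 then
    if a = 1 then true else false
  else
    ucln b (PySem.Int.mod a b)
termination_by b.natAbs
decreasing_by exact pyMod_natAbs_lt a b _hb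

-- ===== PORT B =====
-- the while-loop: state is the pair (a, b), updated exactly as in Source B
def ucln_altLoop (a : Int) (b : Int) : Int :=
  if _hb : b = 0 then a
  else ucln_altLoop b (PySem.Int.mod a b)
termination_by b.natAbs
decreasing_by exact pyMod_natAbs_lt a b _hb

def ucln_alt (a : Int) (b : Int) : Bool :=
  ucln_altLoop a b == 1

-- ===== PRECONDITION & SPEC =====
def Spec_ucln (a : Int) (b : Int) (out : Bool) : Prop := out = ucln_alt a b
instance (a : Int) (b : Int) (out : Bool) : Decidable (Spec_ucln a b out) := by unfold Spec_ucln; infer_instance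

-- ===== CLAIM (what is proved, stated in full; the proofs are below) =====
def Claim_equal_ucln : Prop := ∀ (a : Int) (b : Int), Dom_ucln a b → Spec_ucln a b (ucln a b)

-- ===== LEMMAS AND PROOFS =====
theorem ucln_eq_alt (a b : Int) : ucln a b = ucln_alt a b := by
  unfold ucln_alt
  induction a, b using ucln_altLoop.induct with
  | case1 a =>
      rw [ucln, ucln_altLoop]
      by_cases ha : a = 1 <;> simp [ha]
  | case2 a b hb ih =>
      rw [ucln, ucln_altLoop]
      simpa [hb, ucln_alt] using ih

-- ===== VERDICT (by name: the statement is the Claim_ definition above) =====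
theorem ucln_spec : Claim_equal_ucln := by
  intro a b _
  exact ucln_eq_alt a b
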